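-- pv_equiv track=rewrite | github.com/cgoldammer/human_chess_engine | engine/parse_game.py | invert_move
-- ===== SOURCE A (Python) =====
-- def invert_move(uci):
--   # We replace all numbers by their inverse on the board, e.g. 8 with 1 and 2 with 7
--
--   for i in range(1, 9):
--     uci = uci.replace(str(i), 'A%s' % i)
--
--   for i in range(1, 9):
--     uci = uci.replace('A%s' % i, 'Z%s' % (9 - i))
--
--   for i in range(1, 9):
--     uci = uci.replace('Z%s' % i, str(i))
--
--   return uci
-- ===== SOURCE B (Python) =====
-- def invert_move(uci):
--   # Single left-to-right pass: each rank digit 1-8 is mapped to its inverse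
--   # (i -> 9-i) via a fixed table; every other character is kept as is.
--   mapping = {str(i): str(9 - i) for i in range(1, 9)}
--   return ''.join(mapping.get(c, c) for c in uci)
-- ===== Notes on version B (the rewrite author's own statement) =====
-- stated objective: simpler
-- what changed: Replaced A's three sequential marker-based str.replace sweeps (24 full-string scans with temporary 'A%s'/'Z%s' markers) by one character-wise pass through a fixed digit-inverse dictionary.
import Mathlib
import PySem

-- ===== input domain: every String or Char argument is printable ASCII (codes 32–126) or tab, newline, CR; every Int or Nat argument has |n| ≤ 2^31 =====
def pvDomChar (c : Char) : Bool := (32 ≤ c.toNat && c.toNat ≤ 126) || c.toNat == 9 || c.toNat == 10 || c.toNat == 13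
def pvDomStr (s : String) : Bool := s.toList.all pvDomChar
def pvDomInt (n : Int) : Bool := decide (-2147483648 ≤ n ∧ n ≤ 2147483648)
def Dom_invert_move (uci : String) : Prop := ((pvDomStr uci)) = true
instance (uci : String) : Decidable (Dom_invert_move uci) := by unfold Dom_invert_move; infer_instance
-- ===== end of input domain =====

-- B replaces A's three marker-based replace sweeps by one character-wise pass
-- through a fixed digit-inverse table (simpler; same exact behaviour).

-- ===== PORT A =====
def invert_move (uci : String) : String :=
  let u1 := (PySem.List.pyRange 1 9 1).foldl
    (fun u i => PySem.Str.replace u (PySem.Int.toStr i) ("A" ++ PySem.Int.toStr i)) uci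
  let u2 := (PySem.List.pyRange 1 9 1).foldl
    (fun u i => PySem.Str.replace u ("A" ++ PySem.Int.toStr i) ("Z" ++ PySem.Int.toStr (9 - i))) u1
  let u3 := (PySem.List.pyRange 1 9 1).foldl
    (fun u i => PySem.Str.replace u ("Z" ++ PySem.Int.toStr i) (PySem.Int.toStr i)) u2
  u3

-- ===== PORT B =====
def invert_move_alt (uci : String) : String :=
  let mapping : PySem.Dict String String := (PySem.List.pyRange 1 9 1).foldl
    (fun d i => PySem.Dict.insert d (PySem.Int.toStr i) (PySem.Int.toStr (9 - i))) ⟨[]⟩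
  PySem.Str.join "" (uci.toList.map
    (fun c => PySem.Dict.getD mapping (String.ofList [c]) (String.ofList [c])))

-- ===== PRECONDITION & SPEC =====
def Spec_invert_move (uci : String) (out : String) : Prop := out = invert_move_alt uci
instance (uci : String) (out : String) : Decidable (Spec_invert_move uci out) := by unfold Spec_invert_move; infer_instance

-- ===== CLAIM (what is proved, stated in full; the proofs are below) =====
def Claim_equal_invert_move : Prop := ∀ (uci : String), Dom_invert_move uci → Spec_invert_move uci (invert_move uci)

-- ===== LEMMAS AND PROOFS =====

-- digit value of a rank character ('1'..'8'), 0 for anything else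
def dnum (c : Char) : Nat :=
  if c = '1' then 1 else if c = '2' then 2 else if c = '3' then 3 else if c = '4' then 4
  else if c = '5' then 5 else if c = '6' then 6 else if c = '7' then 7 else if c = '8' then 8 else 0

def chD : Nat → Char
  | 1 => '1' | 2 => '2' | 3 => '3' | 4 => '4'
  | 5 => '5' | 6 => '6' | 7 => '7' | 8 => '8' | _ => '*'

def invC (c : Char) : Char := chD (9 - dnum c)

def phi (c : Char) : Char := if dnum c ≠ 0 then invC c else c

-- naive left-to-right non-overlapping replace on char lists
def rep (old new : List Char) : List Char → List Char
  | [] => []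
  | c :: t =>
    if old.isPrefixOf (c :: t) then new ++ rep old new (List.drop (old.length - 1) t)
    else c :: rep old new t
termination_by l => l.length
decreasing_by all_goals simp [List.length_drop]

theorem rep_nil (old new : List Char) : rep old new [] = [] := by rw [rep]

theorem rep_cons (old new : List Char) (c : Char) (t : List Char) :
    rep old new (c :: t) =
      if old.isPrefixOf (c :: t) then new ++ rep old new (List.drop (old.length - 1) t)
      else c :: rep old new t := by
  rw [rep]

-- after sweep-1 stages 1..k: digits ≤ k carry the 'A' marker
def f1 (k : Nat) (c : Char) : List Char :=
  if dnum c ≠ 0 ∧ dnum c ≤ k then ['A', c] else [c]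

-- after sweep-2 stages 1..k: digits ≤ k converted to their 'Z'-marked inverse
def g2 (k : Nat) (c : Char) : List Char :=
  if dnum c = 0 then [c] else if dnum c ≤ k then ['Z', invC c] else ['A', c]

-- after sweep-3 stages 1..k: inverses with value ≤ k have lost their 'Z' marker
def g3 (k : Nat) (c : Char) : List Char :=
  if dnum c = 0 then [c] else if 9 - dnum c ≤ k then [invC c] else ['Z', invC c]

theorem dnum_le (c : Char) : dnum c ≤ 8 := by
  unfold dnum; split_ifs <;> omega

theorem dnum_cases (c : Char) (h : dnum c ≠ 0) :
    c = '1' ∨ c = '2' ∨ c = '3' ∨ c = '4' ∨ c = '5' ∨ c = '6' ∨ c = '7' ∨ c = '8' := by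
  unfold dnum at h; split_ifs at h <;> tauto

theorem dnum_chD (j : Nat) (h1 : 1 ≤ j) (h2 : j ≤ 8) : dnum (chD j) = j := by
  interval_cases j <;> decide

theorem chD_dnum (c : Char) (h : dnum c ≠ 0) : chD (dnum c) = c := by
  rcases dnum_cases c h with h | h | h | h | h | h | h | h <;> subst h <;> decide

theorem chD_ne_AZ (j : Nat) (h1 : 1 ≤ j) (h2 : j ≤ 8) : chD j ≠ 'A' ∧ chD j ≠ 'Z' := by
  interval_cases j <;> decide

theorem digit_ne_AZ (c : Char) (h : dnum c ≠ 0) : c ≠ 'A' ∧ c ≠ 'Z' := by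
  rcases dnum_cases c h with h | h | h | h | h | h | h | h <;> subst h <;> decide

theorem dnum_invC (c : Char) (h : dnum c ≠ 0) : dnum (invC c) = 9 - dnum c := by
  rcases dnum_cases c h with h | h | h | h | h | h | h | h <;> subst h <;> decide

theorem invC_ne_AZ (c : Char) (h : dnum c ≠ 0) : invC c ≠ 'A' ∧ invC c ≠ 'Z' := by
  rcases dnum_cases c h with h | h | h | h | h | h | h | h <;> subst h <;> decide

theorem eq_chD_iff (c : Char) (j : Nat) (h1 : 1 ≤ j) (h2 : j ≤ 8) :
    c = chD j ↔ dnum c = j := by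
  constructor
  · rintro rfl; exact dnum_chD j h1 h2
  · intro h
    have hne : dnum c ≠ 0 := by omega
    rw [← h, chD_dnum c hne]

theorem flatMap_ext {f g : Char → List Char} (h : ∀ c, f c = g c) (s : List Char) :
    s.flatMap f = s.flatMap g := by
  induction s with
  | nil => rfl
  | cons c t ih => simp [List.flatMap_cons, h c, ih]

-- PySem.Chars.replace (for non-empty pattern) is the naive replace `rep`
theorem go_spec (old new : List Char) (hold : old ≠ []) :
    ∀ (fuel : Nat) (l acc : List Char), l.length ≤ fuel →
      PySem.Chars.replace.go old new fuel l acc = acc.reverse ++ rep old new l := by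
  intro fuel
  induction fuel with
  | zero =>
    intro l acc hl
    have : l = [] := by cases l <;> simp_all
    subst this
    rw [PySem.Chars.replace.go.eq_def]; simp [rep_nil]
  | succ fuel ih =>
    intro l acc hl
    cases l with
    | nil => rw [PySem.Chars.replace.go.eq_def]; simp [rep_nil]
    | cons c t =>
      rw [show PySem.Chars.replace.go old new (fuel+1) (c::t) acc =
            (if old.isPrefixOf (c :: t) = true then
              PySem.Chars.replace.go old new fuel (List.drop old.length (c::t)) (new.reverse ++ acc)
            else PySem.Chars.replace.go old new fuel t (c :: acc))
          from by rw [PySem.Chars.replace.go.eq_def]]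
      by_cases hp : old.isPrefixOf (c :: t)
      · have holdlen : 1 ≤ old.length := by cases old <;> simp_all
        have hdrop : List.drop old.length (c :: t) = List.drop (old.length - 1) t := by
          conv_lhs => rw [show old.length = (old.length - 1) + 1 from by omega]
          rw [List.drop_succ_cons]
        have hlen : (List.drop old.length (c :: t)).length ≤ fuel := by
          simp only [List.length_drop, List.length_cons] at *
          omega
        rw [if_pos hp, ih _ _ hlen, rep_cons, if_pos hp, hdrop]
        simp
      · rw [if_neg hp, ih _ _ (by simp at hl ⊢; omega), rep_cons, if_neg hp]
        simp

theorem replace_eq_rep (s old new : List Char) (hold : old ≠ []) :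
    PySem.Chars.replace s old new = rep old new s := by
  unfold PySem.Chars.replace
  rw [if_neg (by simp [List.isEmpty_iff, hold]), go_spec old new hold s.length s [] le_rfl]
  simp

theorem replace_eq_rep_ne (s : List Char) (c : Char) (old new : List Char) :
    PySem.Chars.replace s (c :: old) new = rep (c :: old) new s :=
  replace_eq_rep s (c :: old) new (by simp)

-- sweep-1 start: no stage done yet
theorem flatMap_f1_zero (s : List Char) : s.flatMap (f1 0) = s := by
  induction s with
  | nil => rfl
  | cons c t ih => simp [f1, ih]

-- first char of a g2-image is never a rank digit
theorem g2_head_ne (k j : Nat) (h1 : 1 ≤ j) (h2 : j ≤ 8) (s : List Char)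
    (x : Char) (xs : List Char) (hx : s.flatMap (g2 k) = x :: xs) : x ≠ chD j := by
  cases s with
  | nil => simp at hx
  | cons c t =>
    simp only [List.flatMap_cons] at hx
    unfold g2 at hx
    split_ifs at hx with h0 hk <;> simp at hx
    · rcases hx with ⟨rfl, -⟩
      intro h
      exact absurd ((eq_chD_iff c j h1 h2).mp h ▸ h0) (by omega)
    · rcases hx with ⟨rfl, -⟩
      exact fun h => (chD_ne_AZ j h1 h2).2 h.symm
    · rcases hx with ⟨rfl, -⟩
      exact fun h => (chD_ne_AZ j h1 h2).1 h.symm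

-- first char of a g3-image is never chD (k+1)
theorem g3_head_ne (k : Nat) (hk : k ≤ 7) (s : List Char)
    (x : Char) (xs : List Char) (hx : s.flatMap (g3 k) = x :: xs) : x ≠ chD (k + 1) := by
  have h1 : 1 ≤ k + 1 := by omega
  have h2 : k + 1 ≤ 8 := by omega
  cases s with
  | nil => simp at hx
  | cons c t =>
    simp only [List.flatMap_cons] at hx
    unfold g3 at hx
    split_ifs at hx with h0 hle <;> simp at hx
    · rcases hx with ⟨rfl, -⟩
      intro h
      exact absurd ((eq_chD_iff c (k+1) h1 h2).mp h ▸ h0) (by omega)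
    · rcases hx with ⟨rfl, -⟩
      intro h
      have := (eq_chD_iff (invC c) (k+1) h1 h2).mp h
      rw [dnum_invC c h0] at this
      omega
    · rcases hx with ⟨rfl, -⟩
      exact fun h => (chD_ne_AZ (k+1) h1 h2).2 h.symm

-- sweep-1, stage k+1
theorem step1 (k : Nat) (hk : k ≤ 7) (s : List Char) :
    rep [chD (k+1)] ['A', chD (k+1)] (s.flatMap (f1 k)) = s.flatMap (f1 (k+1)) := by
  have h1 : 1 ≤ k + 1 := by omega
  have h2 : k + 1 ≤ 8 := by omega
  induction s with
  | nil => simp [rep_nil]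
  | cons c t ih =>
    simp only [List.flatMap_cons]
    by_cases hA : dnum c ≠ 0 ∧ dnum c ≤ k
    · -- already 'A'-marked digit
      rw [show f1 k c = ['A', c] from if_pos hA,
          show f1 (k+1) c = ['A', c] from if_pos ⟨hA.1, by omega⟩]
      simp only [List.cons_append]
      rw [rep_cons, if_neg (by
        simp [List.isPrefixOf]
        exact fun h => (chD_ne_AZ (k+1) h1 h2).1 h)]
      rw [rep_cons, if_neg (by
        simp [List.isPrefixOf]
        intro h
        exact absurd ((eq_chD_iff c (k+1) h1 h2).mp h.symm) (by omega))]
      simp [ih]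
    · by_cases hc : dnum c = k + 1
      · -- unmarked digit with dnum c = k+1 : mark now
        have hceq : c = chD (k+1) := (eq_chD_iff c (k+1) h1 h2).mpr hc
        rw [show f1 k c = [c] from if_neg hA,
            show f1 (k+1) c = ['A', c] from if_pos ⟨by omega, by omega⟩]
        simp only [List.cons_append]
        rw [rep_cons, if_pos (by subst hceq; simp [List.isPrefixOf])]
        subst hceq
        simp [ih]
      · -- untouched character
        rw [show f1 k c = [c] from if_neg hA,
            show f1 (k+1) c = [c] from if_neg (fun h => hA ⟨h.1, by omega⟩)]
        simp only [List.singleton_append]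
        rw [rep_cons, if_neg (by
          simp [List.isPrefixOf]
          exact fun h => hc ((eq_chD_iff c (k+1) h1 h2).mp h.symm))]
        simp [ih]

-- sweep-2, stage k+1
theorem step2 (k : Nat) (hk : k ≤ 7) (s : List Char) :
    rep ['A', chD (k+1)] ['Z', chD (8-k)] (s.flatMap (g2 k)) = s.flatMap (g2 (k+1)) := by
  have h1 : 1 ≤ k + 1 := by omega
  have h2 : k + 1 ≤ 8 := by omega
  induction s with
  | nil => simp [rep_nil]
  | cons c t ih =>
    simp only [List.flatMap_cons]
    by_cases h0 : dnum c = 0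
    · -- non-digit c
      rw [show g2 k c = [c] from if_pos h0,
          show g2 (k+1) c = [c] from if_pos h0]
      simp only [List.singleton_append]
      by_cases hcA : c = 'A'
      · subst hcA
        rw [rep_cons, if_neg (by
          rcases hflat : t.flatMap (g2 k) with _ | ⟨x, xs⟩ <;>
            simp [List.isPrefixOf]
          exact fun h => g2_head_ne k (k+1) h1 h2 t x xs hflat h.symm)]
        simp [ih]
      · rw [rep_cons, if_neg (by
          simp [List.isPrefixOf]
          exact fun h => (hcA h.symm).elim)]
        simp [ih]
    · by_cases hle : dnum c ≤ k
      · -- already converted: ['Z', invC c]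
        rw [show g2 k c = ['Z', invC c] from by simp only [g2, if_neg h0, if_pos hle],
            show g2 (k+1) c = ['Z', invC c] from by
              simp only [g2, if_neg h0, if_pos (show dnum c ≤ k + 1 from by omega)]]
        simp only [List.cons_append]
        rw [rep_cons, if_neg (by simp [List.isPrefixOf])]
        rw [rep_cons, if_neg (by
          simp [List.isPrefixOf]
          exact fun h => ((invC_ne_AZ c h0).1 h.symm).elim)]
        simp [ih]
      · by_cases hc : dnum c = k + 1
        · -- 'A'-marked digit with dnum c = k+1 : convert now
          have hceq : c = chD (k+1) := (eq_chD_iff c (k+1) h1 h2).mpr hc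
          have hinv : invC c = chD (8-k) := by
            unfold invC; rw [hc]; congr 1; omega
          rw [show g2 k c = ['A', c] from by simp only [g2, if_neg h0, if_neg hle],
              show g2 (k+1) c = ['Z', invC c] from by
                simp only [g2, if_neg h0, if_pos (show dnum c ≤ k + 1 from by omega)]]
          simp only [List.cons_append]
          rw [rep_cons, if_pos (by subst hceq; simp [List.isPrefixOf])]
          simp [hinv, ih]
        · -- 'A'-marked digit with dnum c > k+1 : untouched
          rw [show g2 k c = ['A', c] from by simp only [g2, if_neg h0, if_neg hle],
              show g2 (k+1) c = ['A', c] from by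
                simp only [g2, if_neg h0, if_neg (show ¬ dnum c ≤ k + 1 from by omega)]]
          simp only [List.cons_append]
          rw [rep_cons, if_neg (by
            simp [List.isPrefixOf]
            exact fun h => hc ((eq_chD_iff c (k+1) h1 h2).mp h.symm))]
          rw [rep_cons, if_neg (by
            simp [List.isPrefixOf]
            exact fun h => ((digit_ne_AZ c h0).1 h.symm).elim)]
          simp [ih]

-- sweep-3, stage k+1
theorem step3 (k : Nat) (hk : k ≤ 7) (s : List Char) :
    rep ['Z', chD (k+1)] [chD (k+1)] (s.flatMap (g3 k)) = s.flatMap (g3 (k+1)) := by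
  have h1 : 1 ≤ k + 1 := by omega
  have h2 : k + 1 ≤ 8 := by omega
  induction s with
  | nil => simp [rep_nil]
  | cons c t ih =>
    simp only [List.flatMap_cons]
    by_cases h0 : dnum c = 0
    · -- non-digit c
      rw [show g3 k c = [c] from if_pos h0,
          show g3 (k+1) c = [c] from if_pos h0]
      simp only [List.singleton_append]
      by_cases hcZ : c = 'Z'
      · subst hcZ
        rw [rep_cons, if_neg (by
          rcases hflat : t.flatMap (g3 k) with _ | ⟨x, xs⟩ <;>
            simp [List.isPrefixOf]
          exact fun h => g3_head_ne k hk t x xs hflat h.symm)]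
        simp [ih]
      · rw [rep_cons, if_neg (by
          simp [List.isPrefixOf]
          exact fun h => (hcZ h.symm).elim)]
        simp [ih]
    · by_cases hle : 9 - dnum c ≤ k
      · -- already unmarked inverse digit
        rw [show g3 k c = [invC c] from by simp only [g3, if_neg h0, if_pos hle],
            show g3 (k+1) c = [invC c] from by
              simp only [g3, if_neg h0, if_pos (show 9 - dnum c ≤ k + 1 from by omega)]]
        simp only [List.singleton_append]
        rw [rep_cons, if_neg (by
          simp [List.isPrefixOf]
          exact fun h => ((invC_ne_AZ c h0).2 h.symm).elim)]
        simp [ih]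
      · by_cases hc : 9 - dnum c = k + 1
        · -- 'Z'-marked with 9 - dnum c = k+1 : unmark now
          have hinv : invC c = chD (k+1) := by unfold invC; rw [hc]
          rw [show g3 k c = ['Z', invC c] from by simp only [g3, if_neg h0, if_neg hle],
              show g3 (k+1) c = [invC c] from by
                simp only [g3, if_neg h0, if_pos (show 9 - dnum c ≤ k + 1 from by omega)]]
          simp only [List.cons_append]
          rw [rep_cons, if_pos (by simp [List.isPrefixOf, hinv])]
          simp [hinv, ih]
        · -- 'Z'-marked with 9 - dnum c > k+1 : untouched
          rw [show g3 k c = ['Z', invC c] from by simp only [g3, if_neg h0, if_neg hle],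
              show g3 (k+1) c = ['Z', invC c] from by
                simp only [g3, if_neg h0, if_neg (show ¬ (9 - dnum c ≤ k + 1) from by omega)]]
          simp only [List.cons_append]
          rw [rep_cons, if_neg (by
            simp [List.isPrefixOf]
            intro h
            have := (eq_chD_iff (invC c) (k+1) h1 h2).mp h.symm
            rw [dnum_invC c h0] at this
            omega)]
          rw [rep_cons, if_neg (by
            simp [List.isPrefixOf]
            exact fun h => ((invC_ne_AZ c h0).2 h.symm).elim)]
          simp [ih]

theorem f1_eight_eq_g2_zero (s : List Char) : s.flatMap (f1 8) = s.flatMap (g2 0) := by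
  apply flatMap_ext
  intro c
  unfold f1 g2
  have := dnum_le c
  split_ifs <;> simp_all

theorem g2_eight_eq_g3_zero (s : List Char) : s.flatMap (g2 8) = s.flatMap (g3 0) := by
  apply flatMap_ext
  intro c
  unfold g2 g3
  have := dnum_le c
  split_ifs <;> simp_all; omega


theorem g3_eight_eq_map_phi (s : List Char) : s.flatMap (g3 8) = s.map phi := by
  induction s with
  | nil => rfl
  | cons c t ih =>
    simp only [List.flatMap_cons, List.map_cons, ih]
    unfold g3 phi
    have := dnum_le c
    split_ifs <;> simp_all; omega

-- A's result, on the char-list side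
theorem A_toList (uci : String) : (invert_move uci).toList = uci.toList.map phi := by
  unfold invert_move
  rw [show PySem.List.pyRange 1 9 1 = [1,2,3,4,5,6,7,8] from by decide]
  simp only [List.foldl_cons, List.foldl_nil]
  have ea1 : (PySem.Int.toStr 1).toList = ['1'] := by decide
  have eb1 : (("A" ++ PySem.Int.toStr 1)).toList = ['A','1'] := by decide
  have ec1 : (("Z" ++ PySem.Int.toStr (9 - 1))).toList = ['Z','8'] := by decide
  have ed1 : (("Z" ++ PySem.Int.toStr 1)).toList = ['Z','1'] := by decide
  have ea2 : (PySem.Int.toStr 2).toList = ['2'] := by decide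
  have eb2 : (("A" ++ PySem.Int.toStr 2)).toList = ['A','2'] := by decide
  have ec2 : (("Z" ++ PySem.Int.toStr (9 - 2))).toList = ['Z','7'] := by decide
  have ed2 : (("Z" ++ PySem.Int.toStr 2)).toList = ['Z','2'] := by decide
  have ea3 : (PySem.Int.toStr 3).toList = ['3'] := by decide
  have eb3 : (("A" ++ PySem.Int.toStr 3)).toList = ['A','3'] := by decide
  have ec3 : (("Z" ++ PySem.Int.toStr (9 - 3))).toList = ['Z','6'] := by decide
  have ed3 : (("Z" ++ PySem.Int.toStr 3)).toList = ['Z','3'] := by decide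
  have ea4 : (PySem.Int.toStr 4).toList = ['4'] := by decide
  have eb4 : (("A" ++ PySem.Int.toStr 4)).toList = ['A','4'] := by decide
  have ec4 : (("Z" ++ PySem.Int.toStr (9 - 4))).toList = ['Z','5'] := by decide
  have ed4 : (("Z" ++ PySem.Int.toStr 4)).toList = ['Z','4'] := by decide
  have ea5 : (PySem.Int.toStr 5).toList = ['5'] := by decide
  have eb5 : (("A" ++ PySem.Int.toStr 5)).toList = ['A','5'] := by decide
  have ec5 : (("Z" ++ PySem.Int.toStr (9 - 5))).toList = ['Z','4'] := by decide
  have ed5 : (("Z" ++ PySem.Int.toStr 5)).toList = ['Z','5'] := by decide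
  have ea6 : (PySem.Int.toStr 6).toList = ['6'] := by decide
  have eb6 : (("A" ++ PySem.Int.toStr 6)).toList = ['A','6'] := by decide
  have ec6 : (("Z" ++ PySem.Int.toStr (9 - 6))).toList = ['Z','3'] := by decide
  have ed6 : (("Z" ++ PySem.Int.toStr 6)).toList = ['Z','6'] := by decide
  have ea7 : (PySem.Int.toStr 7).toList = ['7'] := by decide
  have eb7 : (("A" ++ PySem.Int.toStr 7)).toList = ['A','7'] := by decide
  have ec7 : (("Z" ++ PySem.Int.toStr (9 - 7))).toList = ['Z','2'] := by decide
  have ed7 : (("Z" ++ PySem.Int.toStr 7)).toList = ['Z','7'] := by decide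
  have ea8 : (PySem.Int.toStr 8).toList = ['8'] := by decide
  have eb8 : (("A" ++ PySem.Int.toStr 8)).toList = ['A','8'] := by decide
  have ec8 : (("Z" ++ PySem.Int.toStr (9 - 8))).toList = ['Z','1'] := by decide
  have ed8 : (("Z" ++ PySem.Int.toStr 8)).toList = ['Z','8'] := by decide
  simp only [PySem.Str.toList_replace, ea1, eb1, ec1, ed1, ea2, eb2, ec2, ed2, ea3, eb3, ec3, ed3, ea4, eb4, ec4, ed4, ea5, eb5, ec5, ed5, ea6, eb6, ec6, ed6, ea7, eb7, ec7, ed7, ea8, eb8, ec8, ed8]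
  simp only [replace_eq_rep_ne]
  rw [← flatMap_f1_zero uci.toList]
  rw [show ∀ s, rep ['1'] ['A','1'] (List.flatMap (f1 0) s) = List.flatMap (f1 1) s from fun s => step1 0 (by omega) s]
  rw [show ∀ s, rep ['2'] ['A','2'] (List.flatMap (f1 1) s) = List.flatMap (f1 2) s from fun s => step1 1 (by omega) s]
  rw [show ∀ s, rep ['3'] ['A','3'] (List.flatMap (f1 2) s) = List.flatMap (f1 3) s from fun s => step1 2 (by omega) s]
  rw [show ∀ s, rep ['4'] ['A','4'] (List.flatMap (f1 3) s) = List.flatMap (f1 4) s from fun s => step1 3 (by omega) s]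
  rw [show ∀ s, rep ['5'] ['A','5'] (List.flatMap (f1 4) s) = List.flatMap (f1 5) s from fun s => step1 4 (by omega) s]
  rw [show ∀ s, rep ['6'] ['A','6'] (List.flatMap (f1 5) s) = List.flatMap (f1 6) s from fun s => step1 5 (by omega) s]
  rw [show ∀ s, rep ['7'] ['A','7'] (List.flatMap (f1 6) s) = List.flatMap (f1 7) s from fun s => step1 6 (by omega) s]
  rw [show ∀ s, rep ['8'] ['A','8'] (List.flatMap (f1 7) s) = List.flatMap (f1 8) s from fun s => step1 7 (by omega) s]
  rw [f1_eight_eq_g2_zero]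
  rw [show ∀ s, rep ['A','1'] ['Z','8'] (List.flatMap (g2 0) s) = List.flatMap (g2 1) s from fun s => step2 0 (by omega) s]
  rw [show ∀ s, rep ['A','2'] ['Z','7'] (List.flatMap (g2 1) s) = List.flatMap (g2 2) s from fun s => step2 1 (by omega) s]
  rw [show ∀ s, rep ['A','3'] ['Z','6'] (List.flatMap (g2 2) s) = List.flatMap (g2 3) s from fun s => step2 2 (by omega) s]
  rw [show ∀ s, rep ['A','4'] ['Z','5'] (List.flatMap (g2 3) s) = List.flatMap (g2 4) s from fun s => step2 3 (by omega) s]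
  rw [show ∀ s, rep ['A','5'] ['Z','4'] (List.flatMap (g2 4) s) = List.flatMap (g2 5) s from fun s => step2 4 (by omega) s]
  rw [show ∀ s, rep ['A','6'] ['Z','3'] (List.flatMap (g2 5) s) = List.flatMap (g2 6) s from fun s => step2 5 (by omega) s]
  rw [show ∀ s, rep ['A','7'] ['Z','2'] (List.flatMap (g2 6) s) = List.flatMap (g2 7) s from fun s => step2 6 (by omega) s]
  rw [show ∀ s, rep ['A','8'] ['Z','1'] (List.flatMap (g2 7) s) = List.flatMap (g2 8) s from fun s => step2 7 (by omega) s]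
  rw [g2_eight_eq_g3_zero]
  rw [show ∀ s, rep ['Z','1'] ['1'] (List.flatMap (g3 0) s) = List.flatMap (g3 1) s from fun s => step3 0 (by omega) s]
  rw [show ∀ s, rep ['Z','2'] ['2'] (List.flatMap (g3 1) s) = List.flatMap (g3 2) s from fun s => step3 1 (by omega) s]
  rw [show ∀ s, rep ['Z','3'] ['3'] (List.flatMap (g3 2) s) = List.flatMap (g3 3) s from fun s => step3 2 (by omega) s]
  rw [show ∀ s, rep ['Z','4'] ['4'] (List.flatMap (g3 3) s) = List.flatMap (g3 4) s from fun s => step3 3 (by omega) s]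
  rw [show ∀ s, rep ['Z','5'] ['5'] (List.flatMap (g3 4) s) = List.flatMap (g3 5) s from fun s => step3 4 (by omega) s]
  rw [show ∀ s, rep ['Z','6'] ['6'] (List.flatMap (g3 5) s) = List.flatMap (g3 6) s from fun s => step3 5 (by omega) s]
  rw [show ∀ s, rep ['Z','7'] ['7'] (List.flatMap (g3 6) s) = List.flatMap (g3 7) s from fun s => step3 6 (by omega) s]
  rw [show ∀ s, rep ['Z','8'] ['8'] (List.flatMap (g3 7) s) = List.flatMap (g3 8) s from fun s => step3 7 (by omega) s]
  rw [g3_eight_eq_map_phi, flatMap_f1_zero]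

theorem ofList_single_inj (c d : Char) (h : String.ofList [d] = String.ofList [c]) : d = c := by
  have := congrArg String.toList h
  simp [String.toList_ofList] at this
  exact this

-- B's per-character table lookup computes phi
theorem B_char (c : Char) :
    PySem.Dict.getD
      ((PySem.List.pyRange 1 9 1).foldl
        (fun d i => PySem.Dict.insert d (PySem.Int.toStr i) (PySem.Int.toStr (9 - i)))
        ⟨[]⟩)
      (String.ofList [c]) (String.ofList [c]) = String.ofList [phi c] := by
  rw [show ((PySem.List.pyRange 1 9 1).foldl
        (fun d i => PySem.Dict.insert d (PySem.Int.toStr i) (PySem.Int.toStr (9 - i)))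
        (⟨[]⟩ : PySem.Dict String String))
      = ⟨[("1","8"),("2","7"),("3","6"),("4","5"),("5","4"),("6","3"),("7","2"),("8","1")]⟩ from by rfl]
  by_cases h1 : c = '1'
  · subst h1; decide
  by_cases h2 : c = '2'
  · subst h2; decide
  by_cases h3 : c = '3'
  · subst h3; decide
  by_cases h4 : c = '4'
  · subst h4; decide
  by_cases h5 : c = '5'
  · subst h5; decide
  by_cases h6 : c = '6'
  · subst h6; decide
  by_cases h7 : c = '7'
  · subst h7; decide
  by_cases h8 : c = '8'
  · subst h8; decide
  have f1 : (("1" : String) == String.ofList [c]) = false := by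
    rw [show ("1" : String) = String.ofList ['1'] from by decide, beq_eq_false_iff_ne]
    exact fun h => h1 (ofList_single_inj c '1' h).symm
  have f2 : (("2" : String) == String.ofList [c]) = false := by
    rw [show ("2" : String) = String.ofList ['2'] from by decide, beq_eq_false_iff_ne]
    exact fun h => h2 (ofList_single_inj c '2' h).symm
  have f3 : (("3" : String) == String.ofList [c]) = false := by
    rw [show ("3" : String) = String.ofList ['3'] from by decide, beq_eq_false_iff_ne]
    exact fun h => h3 (ofList_single_inj c '3' h).symm
  have f4 : (("4" : String) == String.ofList [c]) = false := by
    rw [show ("4" : String) = String.ofList ['4'] from by decide, beq_eq_false_iff_ne]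
    exact fun h => h4 (ofList_single_inj c '4' h).symm
  have f5 : (("5" : String) == String.ofList [c]) = false := by
    rw [show ("5" : String) = String.ofList ['5'] from by decide, beq_eq_false_iff_ne]
    exact fun h => h5 (ofList_single_inj c '5' h).symm
  have f6 : (("6" : String) == String.ofList [c]) = false := by
    rw [show ("6" : String) = String.ofList ['6'] from by decide, beq_eq_false_iff_ne]
    exact fun h => h6 (ofList_single_inj c '6' h).symm
  have f7 : (("7" : String) == String.ofList [c]) = false := by
    rw [show ("7" : String) = String.ofList ['7'] from by decide, beq_eq_false_iff_ne]
    exact fun h => h7 (ofList_single_inj c '7' h).symm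
  have f8 : (("8" : String) == String.ofList [c]) = false := by
    rw [show ("8" : String) = String.ofList ['8'] from by decide, beq_eq_false_iff_ne]
    exact fun h => h8 (ofList_single_inj c '8' h).symm
  simp only [PySem.Dict.getD, PySem.Dict.get?, List.find?, f1, f2, f3, f4, f5, f6, f7, f8]
  simp [phi, dnum, h1, h2, h3, h4, h5, h6, h7, h8]

theorem B_toList (uci : String) : (invert_move_alt uci).toList = uci.toList.map phi := by
  unfold invert_move_alt
  rw [PySem.Str.toList_join]
  have : (uci.toList.map
      (fun c => PySem.Dict.getD
        ((PySem.List.pyRange 1 9 1).foldl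
          (fun d i => PySem.Dict.insert d (PySem.Int.toStr i) (PySem.Int.toStr (9 - i))) ⟨[]⟩)
        (String.ofList [c]) (String.ofList [c]))).map String.toList
      = (uci.toList.map phi).map (fun c => [c]) := by
    simp only [List.map_map]
    apply List.map_congr_left
    intro c _
    simp [Function.comp, B_char c, String.toList_ofList]
  rw [this]
  have : ("" : String).toList = [] := by decide
  rw [this, PySem.Chars.join_nil_singletons]

-- ===== VERDICT (by name: the statement is the Claim_ definition above) =====
theorem invert_move_spec : Claim_equal_invert_move := by
  intro uci _
  unfold Spec_invert_move
  have h := (A_toList uci).trans (B_toList uci).symm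
  calc invert_move uci = String.ofList (invert_move uci).toList := by rw [String.ofList_toList]
    _ = String.ofList (invert_move_alt uci).toList := by rw [h]
    _ = invert_move_alt uci := by rw [String.ofList_toList]
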